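-- pv_equiv track=rewrite | github.com/srittau/rouver | rouver/util.py | rfc2616_quote
-- ===== SOURCE A (Python) =====
-- def rfc2616_quote(s: str) -> str:
--     """Quote a string according to RFC 2616."""
--     quoted = ""
--     for c in s:
--         if ord(c) < 32 or ord(c) > 126:
--             quoted += f"\\{c}"
--         elif c == '"':
--             quoted += '\\"'
--         else:
--             quoted += c
--     return f'"{quoted}"'
-- ===== SOURCE B (Python) =====
-- def rfc2616_quote(s: str) -> str:
--     """Quote a string according to RFC 2616.
--
--     Every escape is backslash + the character itself, so instead of mapping
--     char by char we insert a backslash before each special position and copy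
--     the unescaped runs as whole slices, joining once at the end.
--     """
--     parts = []
--     start = 0
--     for i, c in enumerate(s):
--         if c == '"' or ord(c) < 32 or ord(c) > 126:
--             parts.append(s[start:i])
--             parts.append("\\")
--             start = i
--     parts.append(s[start:])
--     return '"' + "".join(parts) + '"'
-- ===== Notes on version B (the rewrite author's own statement) =====
-- stated objective: alternative
-- what changed: Instead of mapping each character through an if/elif/else and concatenating, B exploits that every escape is backslash+char: it records only the positions of special characters, inserting a lone backslash and copying the unescaped runs as whole slices, joined once at the end.
import Mathlib
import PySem

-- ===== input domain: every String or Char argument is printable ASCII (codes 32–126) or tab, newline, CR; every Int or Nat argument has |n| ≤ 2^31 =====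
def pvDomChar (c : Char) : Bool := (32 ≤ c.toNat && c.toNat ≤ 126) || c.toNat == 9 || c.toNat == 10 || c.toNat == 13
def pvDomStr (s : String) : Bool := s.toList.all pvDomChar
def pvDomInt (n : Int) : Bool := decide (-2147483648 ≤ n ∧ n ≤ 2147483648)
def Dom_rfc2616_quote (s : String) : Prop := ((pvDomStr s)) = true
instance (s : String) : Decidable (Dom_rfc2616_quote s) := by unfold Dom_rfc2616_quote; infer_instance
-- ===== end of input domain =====

-- B replaces A's per-character escape mapping by slice-and-join: every escape is
-- backslash + the char itself, so B inserts a backslash before each special position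
-- and copies the unescaped runs as whole slices (alternative decomposition, no speed claim).

-- ===== PORT A =====
-- A: accumulate 'quoted' char by char, then wrap in quotes.
def rfc2616_quote (s : String) : String :=
  let quoted : List Char := s.toList.foldl (fun acc c =>
    if c.toNat < 32 || c.toNat > 126 then acc ++ ['\\', c]
    else if c == '"' then acc ++ ['\\', '"']
    else acc ++ [c]) []
  String.ofList ('"' :: (quoted ++ ['"']))

-- ===== PORT B =====
-- B's loop body: on a special char, append the pending slice s[start:i] and "\\"
-- to parts and restart the run at i; otherwise leave (parts, start) unchanged.
def pvStepB (cs : List Char) (acc : List (List Char) × Int) (p : Int × Char) :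
    List (List Char) × Int :=
  if p.2 == '"' || p.2.toNat < 32 || p.2.toNat > 126 then
    (acc.1 ++ [PySem.List.slice cs (some acc.2) (some p.1), ['\\']], p.1)
  else acc

def rfc2616_quote_alt (s : String) : String :=
  let cs := s.toList
  let r := (PySem.List.enumerate cs 0).foldl (pvStepB cs) ([], 0)
  let parts := r.1 ++ [PySem.List.slice cs (some r.2) none]    -- parts.append(s[start:])
  String.ofList ('"' :: (parts.flatten ++ ['"']))              -- '"' + "".join(parts) + '"'

-- ===== PRECONDITION & SPEC =====
def Spec_rfc2616_quote (s : String) (out : String) : Prop := out = rfc2616_quote_alt s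
instance (s : String) (out : String) : Decidable (Spec_rfc2616_quote s out) := by unfold Spec_rfc2616_quote; infer_instance

-- ===== CLAIM (what is proved, stated in full; the proofs are below) =====
def Claim_equal_rfc2616_quote : Prop := ∀ (s : String), Dom_rfc2616_quote s → Spec_rfc2616_quote s (rfc2616_quote s)

-- ===== LEMMAS AND PROOFS =====

-- the per-character replacement both programs realize
def pvRep (c : Char) : List Char :=
  if c == '"' || c.toNat < 32 || c.toNat > 126 then ['\\', c] else [c]

-- A's accumulation loop emits exactly pvRep for each character
theorem pvA_eq_flatMap (cs : List Char) :
    cs.foldl (fun acc c =>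
      if c.toNat < 32 || c.toNat > 126 then acc ++ ['\\', c]
      else if c == '"' then acc ++ ['\\', '"']
      else acc ++ [c]) [] = cs.flatMap pvRep := by
  have hf : (fun (acc : List Char) c =>
      if c.toNat < 32 || c.toNat > 126 then acc ++ ['\\', c]
      else if c == '"' then acc ++ ['\\', '"']
      else acc ++ [c]) = fun acc c => acc ++ pvRep c := by
    funext acc c
    unfold pvRep
    by_cases hq : c = '"'
    · subst hq; simp
    · have hne : ¬ (c == '"') = true := by simp [hq]
      by_cases hlo : c.toNat < 32 <;> by_cases hhi : c.toNat > 126 <;>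
        simp [hlo, hhi, hne]
  rw [hf, PySem.List.foldl_append_eq_flatMap]
  simp

-- loop invariant of B: folding over the enumeration of the suffix cs.drop k with run
-- start 'start ≤ k' yields (flattened, plus the final pending slice) the already-emitted
-- parts, the pending unescaped run, and the escaped suffix.
theorem pvB_inv (cs : List Char) :
    ∀ (tl : List Char) (k start : Nat) (parts : List (List Char)),
      start ≤ k → tl = cs.drop k →
      (let r := (PySem.List.enumerate tl (k : Int)).foldl (pvStepB cs) (parts, (start : Int))
       r.1.flatten ++ PySem.List.slice cs (some r.2) none)
      = parts.flatten ++ (cs.drop start).take (k - start) ++ tl.flatMap pvRep := by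
  intro tl
  induction tl with
  | nil =>
    intro k start parts hsk htl
    simp only [PySem.List.enumerate, List.foldl_nil]
    rw [PySem.List.slice_from cs (by positivity)]
    simp only [Int.toNat_natCast, List.flatMap_nil, List.append_nil]
    have hlen : cs.length ≤ k := by
      by_contra h
      push Not at h
      have : cs.drop k ≠ [] := by
        simp [List.drop_eq_nil_iff]; omega
      exact this htl.symm
    rw [List.take_of_length_le (by simp; omega)]
  | cons c tl ih =>
    intro k start parts hsk htl
    have hk : k < cs.length := by
      by_contra h
      push Not at h
      rw [List.drop_of_length_le h] at htl
      exact List.cons_ne_nil c tl htl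
    have htl' : tl = cs.drop (k + 1) := by
      have := congrArg List.tail htl
      simpa [List.tail_drop] using this
    have hck : cs[k]? = some c := by
      have : (cs.drop k)[0]? = some c := by rw [← htl]; rfl
      simpa [List.getElem?_drop] using this
    rw [PySem.List.enumerate_cons]
    simp only [List.foldl_cons]
    by_cases hs : (c == '"' || c.toNat < 32 || c.toNat > 126) = true
    · -- special char: emit the pending slice and a backslash, restart the run at k
      have hstep : pvStepB cs (parts, (start : Int)) ((k : Int), c)
          = (parts ++ [PySem.List.slice cs (some (start : Int)) (some (k : Int)), ['\\']], (k : Int)) := by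
        simp [pvStepB, hs]
      rw [hstep]
      have hcast : ((k : Int) + 1) = ((k + 1 : Nat) : Int) := by push_cast; ring
      rw [hcast]
      rw [ih (k + 1) k (parts ++ [PySem.List.slice cs (some (start : Int)) (some (k : Int)), ['\\']])
        (by omega) htl']
      rw [PySem.List.slice_toNat cs (by positivity) (by positivity)]
      simp only [Int.toNat_natCast, List.flatten_append, List.flatten_cons, List.flatten_nil,
        List.append_nil, List.flatMap_cons]
      have htake1 : (cs.drop k).take (k + 1 - k) = [c] := by
        rw [← htl]; simp
      rw [htake1]
      have hrep : pvRep c = ['\\', c] := by simp [pvRep, hs]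
      rw [hrep]
      simp
    · -- normal char: the pending run grows by one character
      have hstep : pvStepB cs (parts, (start : Int)) ((k : Int), c) = (parts, (start : Int)) := by
        simp only [pvStepB, hs]; rfl
      rw [hstep]
      have hcast : ((k : Int) + 1) = ((k + 1 : Nat) : Int) := by push_cast; ring
      rw [hcast]
      rw [ih (k + 1) start parts (by omega) htl']
      have htake : (cs.drop start).take (k + 1 - start) = (cs.drop start).take (k - start) ++ [c] := by
        have h1 : k + 1 - start = (k - start) + 1 := by omega
        rw [h1, List.take_add_one]
        have : (cs.drop start)[k - start]? = some c := by
          rw [List.getElem?_drop]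
          have : start + (k - start) = k := by omega
          rw [this, hck]
        simp [this]
      have hrep : pvRep c = [c] := by simp only [pvRep, hs]; rfl
      rw [htake, List.flatMap_cons, hrep]
      simp

-- ===== VERDICT (by name: the statement is the Claim_ definition above) =====
theorem rfc2616_quote_spec : Claim_equal_rfc2616_quote := by
  intro s _
  unfold Spec_rfc2616_quote rfc2616_quote rfc2616_quote_alt
  have h := pvB_inv s.toList s.toList 0 0 [] (le_refl 0) (by simp)
  simp only [Nat.cast_zero, List.drop_zero, Nat.sub_self, List.take_zero, List.nil_append,
    List.flatten_nil] at h
  rw [pvA_eq_flatMap]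
  simp only [List.flatten_append, List.flatten_cons, List.flatten_nil, List.append_nil]
  rw [h]
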